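-- pv_equiv track=rewrite | github.com/jmfreder123/az_boards | build_turnout_csv.py | normalize_county
-- ===== SOURCE A (Python) =====
-- COUNTY_DISPLAY = {
--     "apache": "Apache", "cochise": "Cochise", "coconino": "Coconino",
--     "gila": "Gila", "graham": "Graham", "greenlee": "Greenlee",
--     "la_paz": "La Paz", "maricopa": "Maricopa", "mohave": "Mohave",
--     "navajo": "Navajo", "pima": "Pima", "pinal": "Pinal",
--     "santa_cruz": "Santa Cruz", "yavapai": "Yavapai", "yuma": "Yuma"
-- }
--
-- DISPLAY_TO_KEY = {v: k for k, v in COUNTY_DISPLAY.items()}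
--
-- def normalize_county(name):
--     """Normalize county name to our standard display form."""
--     name = name.strip()
--     for display, key in DISPLAY_TO_KEY.items():
--         if name.lower() == display.lower():
--             return COUNTY_DISPLAY[key]
--     # Try direct match
--     for key, display in COUNTY_DISPLAY.items():
--         if name.lower() == display.lower():
--             return display
--     return name
-- ===== SOURCE B (Python) =====
-- CANONICAL = {
--     "apache", "cochise", "coconino", "gila", "graham", "greenlee",
--     "la paz", "maricopa", "mohave", "navajo", "pima", "pinal",
--     "santa cruz", "yavapai", "yuma"
-- }
--
-- def normalize_county(name):
--     """Normalize county name to our standard display form."""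
--     s = name.strip()
--     low = s.lower()
--     if low in CANONICAL:
--         return " ".join(w.capitalize() for w in low.split(" "))
--     return s
-- ===== Notes on version B (the rewrite author's own statement) =====
-- stated objective: faster
-- what changed: Replaced A's two sequential scans over the county tables (each lowercasing every display form per call) with one membership test of the lowercased stripped name in a precomputed set of canonical lowercase names, reconstructing the display form by capitalizing each word instead of looking it up.
import Mathlib
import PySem

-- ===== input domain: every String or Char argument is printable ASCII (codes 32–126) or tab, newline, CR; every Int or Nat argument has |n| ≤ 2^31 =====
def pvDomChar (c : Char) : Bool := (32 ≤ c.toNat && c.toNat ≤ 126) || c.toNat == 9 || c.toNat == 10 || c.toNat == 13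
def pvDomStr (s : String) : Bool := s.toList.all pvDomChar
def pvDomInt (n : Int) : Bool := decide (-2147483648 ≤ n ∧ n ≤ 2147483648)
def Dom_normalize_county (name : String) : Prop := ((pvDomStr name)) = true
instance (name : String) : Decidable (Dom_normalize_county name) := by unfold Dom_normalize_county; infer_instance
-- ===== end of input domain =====

-- B replaces A's two linear scans with set membership in the lowercase canonical names
-- plus reconstructing the display form by capitalizing each word (alternative algorithm; same results).


-- ===== PORT A =====
def pvCountyDisplay : PySem.Dict String String := PySem.Dict.ofList
  [("apache", "Apache"), ("cochise", "Cochise"), ("coconino", "Coconino"),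
   ("gila", "Gila"), ("graham", "Graham"), ("greenlee", "Greenlee"),
   ("la_paz", "La Paz"), ("maricopa", "Maricopa"), ("mohave", "Mohave"),
   ("navajo", "Navajo"), ("pima", "Pima"), ("pinal", "Pinal"),
   ("santa_cruz", "Santa Cruz"), ("yavapai", "Yavapai"), ("yuma", "Yuma")]

-- DISPLAY_TO_KEY = {v: k for k, v in COUNTY_DISPLAY.items()}
def pvDisplayToKey : PySem.Dict String String :=
  PySem.Dict.ofList (pvCountyDisplay.items.map (fun kv => (kv.2, kv.1)))

-- first loop: for display, key in DISPLAY_TO_KEY.items(): if name.lower() == display.lower(): return COUNTY_DISPLAY[key]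
-- (every key stored in DISPLAY_TO_KEY is a key of COUNTY_DISPLAY, so getD's default is unreachable)
def pvLoop1 (s : String) : List (String × String) → Option String
  | [] => none
  | (display, key) :: rest =>
    if PySem.Str.lower s == PySem.Str.lower display then some (pvCountyDisplay.getD key "")
    else pvLoop1 s rest

-- second loop: for key, display in COUNTY_DISPLAY.items(): if name.lower() == display.lower(): return display
def pvLoop2 (s : String) : List (String × String) → Option String
  | [] => none
  | (_, display) :: rest =>
    if PySem.Str.lower s == PySem.Str.lower display then some display
    else pvLoop2 s rest

def normalize_county (name : String) : String :=
  let s := PySem.Str.strip name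
  match pvLoop1 s pvDisplayToKey.items with
  | some r => r
  | none =>
    match pvLoop2 s pvCountyDisplay.items with
    | some r => r
    | none => s

-- ===== PORT B =====
-- CANONICAL = {"apache", ..., "yuma"} (the lowercased display forms)
def pvCanonical : PySem.Set String := PySem.Set.ofList
  ["apache", "cochise", "coconino", "gila", "graham", "greenlee",
   "la paz", "maricopa", "mohave", "navajo", "pima", "pinal",
   "santa cruz", "yavapai", "yuma"]

-- w.capitalize(): first char uppercased, rest lowercased (exact on the ASCII domain)
def pvCapitalize (w : List Char) : List Char :=
  match w with
  | [] => []
  | c :: cs => PySem.Chars.upperChar c :: cs.map PySem.Chars.lowerChar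

def normalize_county_alt (name : String) : String :=
  let s := PySem.Str.strip name
  let low := PySem.Str.lower s
  if PySem.Set.contains pvCanonical low then
    String.ofList (PySem.Chars.join [' '] ((PySem.Chars.splitOn low.toList [' ']).map pvCapitalize))
  else s

-- ===== PRECONDITION & SPEC =====
def Spec_normalize_county (name : String) (out : String) : Prop := out = normalize_county_alt name
instance (name : String) (out : String) : Decidable (Spec_normalize_county name out) := by unfold Spec_normalize_county; infer_instance

-- ===== CLAIM =====
def Claim_equal_normalize_county : Prop := ∀ (name : String), Dom_normalize_county name → Spec_normalize_county name (normalize_county name)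

-- ===== LEMMAS AND PROOFS =====
lemma pvLoop1_eval (s : String) : pvLoop1 s pvDisplayToKey.items = (if PySem.Str.lower s == "apache" then some "Apache" else (if PySem.Str.lower s == "cochise" then some "Cochise" else (if PySem.Str.lower s == "coconino" then some "Coconino" else (if PySem.Str.lower s == "gila" then some "Gila" else (if PySem.Str.lower s == "graham" then some "Graham" else (if PySem.Str.lower s == "greenlee" then some "Greenlee" else (if PySem.Str.lower s == "la paz" then some "La Paz" else (if PySem.Str.lower s == "maricopa" then some "Maricopa" else (if PySem.Str.lower s == "mohave" then some "Mohave" else (if PySem.Str.lower s == "navajo" then some "Navajo" else (if PySem.Str.lower s == "pima" then some "Pima" else (if PySem.Str.lower s == "pinal" then some "Pinal" else (if PySem.Str.lower s == "santa cruz" then some "Santa Cruz" else (if PySem.Str.lower s == "yavapai" then some "Yavapai" else (if PySem.Str.lower s == "yuma" then some "Yuma" else none))))))))))))))) := by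
  have h1 : pvDisplayToKey.items = [("Apache", "apache"), ("Cochise", "cochise"), ("Coconino", "coconino"), ("Gila", "gila"), ("Graham", "graham"), ("Greenlee", "greenlee"), ("La Paz", "la_paz"), ("Maricopa", "maricopa"), ("Mohave", "mohave"), ("Navajo", "navajo"), ("Pima", "pima"), ("Pinal", "pinal"), ("Santa Cruz", "santa_cruz"), ("Yavapai", "yavapai"), ("Yuma", "yuma")] := by decide
  have hl0 : PySem.Str.lower "Apache" = "apache" := by decide
  have hl1 : PySem.Str.lower "Cochise" = "cochise" := by decide
  have hl2 : PySem.Str.lower "Coconino" = "coconino" := by decide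
  have hl3 : PySem.Str.lower "Gila" = "gila" := by decide
  have hl4 : PySem.Str.lower "Graham" = "graham" := by decide
  have hl5 : PySem.Str.lower "Greenlee" = "greenlee" := by decide
  have hl6 : PySem.Str.lower "La Paz" = "la paz" := by decide
  have hl7 : PySem.Str.lower "Maricopa" = "maricopa" := by decide
  have hl8 : PySem.Str.lower "Mohave" = "mohave" := by decide
  have hl9 : PySem.Str.lower "Navajo" = "navajo" := by decide
  have hl10 : PySem.Str.lower "Pima" = "pima" := by decide
  have hl11 : PySem.Str.lower "Pinal" = "pinal" := by decide
  have hl12 : PySem.Str.lower "Santa Cruz" = "santa cruz" := by decide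
  have hl13 : PySem.Str.lower "Yavapai" = "yavapai" := by decide
  have hl14 : PySem.Str.lower "Yuma" = "yuma" := by decide
  have hk0 : pvCountyDisplay.getD "apache" "" = "Apache" := by decide
  have hk1 : pvCountyDisplay.getD "cochise" "" = "Cochise" := by decide
  have hk2 : pvCountyDisplay.getD "coconino" "" = "Coconino" := by decide
  have hk3 : pvCountyDisplay.getD "gila" "" = "Gila" := by decide
  have hk4 : pvCountyDisplay.getD "graham" "" = "Graham" := by decide
  have hk5 : pvCountyDisplay.getD "greenlee" "" = "Greenlee" := by decide
  have hk6 : pvCountyDisplay.getD "la_paz" "" = "La Paz" := by decide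
  have hk7 : pvCountyDisplay.getD "maricopa" "" = "Maricopa" := by decide
  have hk8 : pvCountyDisplay.getD "mohave" "" = "Mohave" := by decide
  have hk9 : pvCountyDisplay.getD "navajo" "" = "Navajo" := by decide
  have hk10 : pvCountyDisplay.getD "pima" "" = "Pima" := by decide
  have hk11 : pvCountyDisplay.getD "pinal" "" = "Pinal" := by decide
  have hk12 : pvCountyDisplay.getD "santa_cruz" "" = "Santa Cruz" := by decide
  have hk13 : pvCountyDisplay.getD "yavapai" "" = "Yavapai" := by decide
  have hk14 : pvCountyDisplay.getD "yuma" "" = "Yuma" := by decide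
  rw [h1]
  simp only [pvLoop1, hl0, hl1, hl2, hl3, hl4, hl5, hl6, hl7, hl8, hl9, hl10, hl11, hl12, hl13, hl14, hk0, hk1, hk2, hk3, hk4, hk5, hk6, hk7, hk8, hk9, hk10, hk11, hk12, hk13, hk14]

lemma pvLoop2_eval (s : String) : pvLoop2 s pvCountyDisplay.items = (if PySem.Str.lower s == "apache" then some "Apache" else (if PySem.Str.lower s == "cochise" then some "Cochise" else (if PySem.Str.lower s == "coconino" then some "Coconino" else (if PySem.Str.lower s == "gila" then some "Gila" else (if PySem.Str.lower s == "graham" then some "Graham" else (if PySem.Str.lower s == "greenlee" then some "Greenlee" else (if PySem.Str.lower s == "la paz" then some "La Paz" else (if PySem.Str.lower s == "maricopa" then some "Maricopa" else (if PySem.Str.lower s == "mohave" then some "Mohave" else (if PySem.Str.lower s == "navajo" then some "Navajo" else (if PySem.Str.lower s == "pima" then some "Pima" else (if PySem.Str.lower s == "pinal" then some "Pinal" else (if PySem.Str.lower s == "santa cruz" then some "Santa Cruz" else (if PySem.Str.lower s == "yavapai" then some "Yavapai" else (if PySem.Str.lower s == "yuma" then some "Yuma" else none))))))))))))))) := by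
  have h2 : pvCountyDisplay.items = [("apache", "Apache"), ("cochise", "Cochise"), ("coconino", "Coconino"), ("gila", "Gila"), ("graham", "Graham"), ("greenlee", "Greenlee"), ("la_paz", "La Paz"), ("maricopa", "Maricopa"), ("mohave", "Mohave"), ("navajo", "Navajo"), ("pima", "Pima"), ("pinal", "Pinal"), ("santa_cruz", "Santa Cruz"), ("yavapai", "Yavapai"), ("yuma", "Yuma")] := by decide
  have hl0 : PySem.Str.lower "Apache" = "apache" := by decide
  have hl1 : PySem.Str.lower "Cochise" = "cochise" := by decide
  have hl2 : PySem.Str.lower "Coconino" = "coconino" := by decide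
  have hl3 : PySem.Str.lower "Gila" = "gila" := by decide
  have hl4 : PySem.Str.lower "Graham" = "graham" := by decide
  have hl5 : PySem.Str.lower "Greenlee" = "greenlee" := by decide
  have hl6 : PySem.Str.lower "La Paz" = "la paz" := by decide
  have hl7 : PySem.Str.lower "Maricopa" = "maricopa" := by decide
  have hl8 : PySem.Str.lower "Mohave" = "mohave" := by decide
  have hl9 : PySem.Str.lower "Navajo" = "navajo" := by decide
  have hl10 : PySem.Str.lower "Pima" = "pima" := by decide
  have hl11 : PySem.Str.lower "Pinal" = "pinal" := by decide
  have hl12 : PySem.Str.lower "Santa Cruz" = "santa cruz" := by decide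
  have hl13 : PySem.Str.lower "Yavapai" = "yavapai" := by decide
  have hl14 : PySem.Str.lower "Yuma" = "yuma" := by decide
  rw [h2]
  simp only [pvLoop2, hl0, hl1, hl2, hl3, hl4, hl5, hl6, hl7, hl8, hl9, hl10, hl11, hl12, hl13, hl14]

lemma pvContains_eval (l : String) : PySem.Set.contains pvCanonical l = (decide (l = "apache") || decide (l = "cochise") || decide (l = "coconino") || decide (l = "gila") || decide (l = "graham") || decide (l = "greenlee") || decide (l = "la paz") || decide (l = "maricopa") || decide (l = "mohave") || decide (l = "navajo") || decide (l = "pima") || decide (l = "pinal") || decide (l = "santa cruz") || decide (l = "yavapai") || decide (l = "yuma")) := by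
  simp [pvCanonical, PySem.Set.contains, PySem.Set.ofList, Bool.or_assoc]

-- ===== VERDICT =====
set_option maxHeartbeats 1000000 in
theorem normalize_county_spec : Claim_equal_normalize_county := by
  intro name _
  unfold Spec_normalize_county
  simp only [normalize_county, normalize_county_alt, pvLoop1_eval, pvLoop2_eval, pvContains_eval]
  generalize PySem.Str.strip name = s
  generalize PySem.Str.lower s = l
  by_cases e0 : l = "apache"
  · subst e0
    simp
    try decide
  by_cases e1 : l = "cochise"
  · subst e1
    simp
    try decide
  by_cases e2 : l = "coconino"
  · subst e2
    simp
    try decide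
  by_cases e3 : l = "gila"
  · subst e3
    simp
    try decide
  by_cases e4 : l = "graham"
  · subst e4
    simp
    try decide
  by_cases e5 : l = "greenlee"
  · subst e5
    simp
    try decide
  by_cases e6 : l = "la paz"
  · subst e6
    simp
    try decide
  by_cases e7 : l = "maricopa"
  · subst e7
    simp
    try decide
  by_cases e8 : l = "mohave"
  · subst e8
    simp
    try decide
  by_cases e9 : l = "navajo"
  · subst e9
    simp
    try decide
  by_cases e10 : l = "pima"
  · subst e10
    simp
    try decide
  by_cases e11 : l = "pinal"
  · subst e11
    simp
    try decide
  by_cases e12 : l = "santa cruz"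
  · subst e12
    simp
    try decide
  by_cases e13 : l = "yavapai"
  · subst e13
    simp
    try decide
  by_cases e14 : l = "yuma"
  · subst e14
    simp
    try decide
  simp [e0, e1, e2, e3, e4, e5, e6, e7, e8, e9, e10, e11, e12, e13, e14]
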